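-- pv_equiv track=rewrite | github.com/Akaexus/hackerprank | simple/can_you_slice_it.py | canSlice
-- ===== SOURCE A (Python) =====
-- def canSlice(indices):
--     startingDiff = 0
--     for i in range(0, len(indices)-1):
--         if i == 0:
--             startingDiff = indices[1] - indices[0]
--         else:
--             if (indices[i+1] - indices[i]) != startingDiff:
--                 return False
--     return True
-- ===== SOURCE B (Python) =====
-- def canSlice(indices):
--     if len(indices) < 2:
--         return True
--     first = indices[0]
--     d = indices[1] - first
--     return indices == [first + i * d for i in range(len(indices))]
-- ===== Notes on version B (the rewrite author's own statement) =====
-- stated objective: alternative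
-- what changed: Instead of scanning consecutive differences against a running reference with early exit, B builds the whole ideal arithmetic progression predicted by the first two elements (first + i*d via a closed form) and compares it wholesale against the input list.
import Mathlib
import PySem

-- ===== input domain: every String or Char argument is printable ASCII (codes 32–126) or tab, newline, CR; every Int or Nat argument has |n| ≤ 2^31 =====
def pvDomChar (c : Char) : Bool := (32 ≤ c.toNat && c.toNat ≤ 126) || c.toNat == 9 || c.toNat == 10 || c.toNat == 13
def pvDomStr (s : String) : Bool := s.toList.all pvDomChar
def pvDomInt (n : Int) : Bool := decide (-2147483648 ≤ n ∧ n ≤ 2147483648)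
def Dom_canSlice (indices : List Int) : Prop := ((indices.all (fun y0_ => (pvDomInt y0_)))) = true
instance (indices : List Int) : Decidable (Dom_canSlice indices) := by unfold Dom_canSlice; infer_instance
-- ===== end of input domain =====

-- B replaces A's running-reference scan of consecutive differences (with early exit)
-- by constructing the ideal arithmetic progression predicted by the first two elements
-- and comparing it wholesale with the input (alternative; same return value everywhere).

-- ===== PORT A =====
-- the loop 'for i in range(0, len(indices)-1)' with early 'return False';
-- indices[i], indices[i+1], indices[0], indices[1] are always in range inside the
-- loop, so pyGetD with default 0 is exact here.
def canSliceGo (indices : List Int) : List Int → Int → Bool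
  | [], _ => true
  | i :: rest, startingDiff =>
    if i == 0 then
      canSliceGo indices rest
        (PySem.List.pyGetD indices 1 0 - PySem.List.pyGetD indices 0 0)
    else
      if (PySem.List.pyGetD indices (i + 1) 0 - PySem.List.pyGetD indices i 0)
          != startingDiff then false
      else canSliceGo indices rest startingDiff

def canSlice (indices : List Int) : Bool :=
  canSliceGo indices (PySem.List.pyRange 0 ((indices.length : Int) - 1) 1) 0

-- ===== PORT B =====
-- indices[0], indices[1] are in range under the length guard, so pyGetD 0 is exact;
-- the comprehension over range(len(indices)) is pyRange 0 len 1 mapped; '==' on lists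
-- is decidable equality.
def canSlice_alt (indices : List Int) : Bool :=
  if indices.length < 2 then true
  else
    let first := PySem.List.pyGetD indices 0 0
    let d := PySem.List.pyGetD indices 1 0 - first
    decide (indices =
      (PySem.List.pyRange 0 (indices.length : Int) 1).map (fun i => first + i * d))

-- ===== PRECONDITION & SPEC =====
def Spec_canSlice (indices : List Int) (out : Bool) : Prop := out = canSlice_alt indices
instance (indices : List Int) (out : Bool) : Decidable (Spec_canSlice indices out) := by unfold Spec_canSlice; infer_instance

-- ===== CLAIM (what is proved, stated in full; the proofs are below) =====
def Claim_equal_canSlice : Prop := ∀ (indices : List Int), Dom_canSlice indices → Spec_canSlice indices (canSlice indices)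

-- ===== LEMMAS AND PROOFS =====

-- the common characterisation: every consecutive difference equals d
def pvAllEq (l : List Int) (d : Int) : Bool := l.all (fun x => x == d)

-- diffs of a list
def pvDiffs (xs : List Int) : List Int :=
  (List.zip xs (xs.drop 1)).map (fun p => p.2 - p.1)

lemma pvDiffs_cons2 (a b : Int) (t : List Int) :
    pvDiffs (a :: b :: t) = (b - a) :: pvDiffs (b :: t) := by
  simp [pvDiffs]

-- B-side: a list is the affine list from a0 with step d iff it starts at a0 and all
-- consecutive differences are d
lemma affine_char (ys : List Int) : ∀ (a a0 d : Int),
    ((a :: ys) = (List.range (ys.length + 1)).map (fun k : Nat => a0 + (k : Int) * d)) ↔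
      (a = a0 ∧ pvAllEq (pvDiffs (a :: ys)) d = true) := by
  induction ys with
  | nil => intro a a0 d; simp [pvDiffs, pvAllEq]
  | cons y t ih =>
    intro a a0 d
    rw [List.range_succ_eq_map, List.map_cons, List.map_map]
    have htail : (List.range (t.length + 1)).map
          ((fun k : Nat => a0 + (k : Int) * d) ∘ Nat.succ) =
        (List.range (t.length + 1)).map (fun k : Nat => (a0 + d) + (k : Int) * d) := by
      apply List.map_congr_left; intro k _
      simp only [Function.comp, Nat.succ_eq_add_one]; push_cast; ring
    rw [List.cons_eq_cons]
    simp only [List.length_cons]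
    rw [htail, ih y (a0 + d) d]
    simp only [pvDiffs_cons2]
    simp only [pvAllEq, List.all_cons, Bool.and_eq_true, beq_iff_eq,
      Nat.cast_zero, zero_mul, add_zero]
    constructor
    · rintro ⟨ha, hy, h⟩; exact ⟨ha, by omega, h⟩
    · rintro ⟨ha, hy, h⟩; exact ⟨ha, by omega, h⟩

lemma alt_eq (indices : List Int) :
    canSlice_alt indices =
      (match pvDiffs indices with
       | [] => true
       | d :: t => pvAllEq t d) := by
  match indices with
  | [] => decide
  | [a] => simp [canSlice_alt, pvDiffs]
  | a :: b :: t =>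
    have hg1 : PySem.List.pyGetD (a :: b :: t) 1 0 = b := by
      simp [PySem.List.pyGetD, PySem.List.pyGet?, PySem.List.pyIdx?]
    have hg0 : PySem.List.pyGetD (a :: b :: t) 0 0 = a := by
      have hnn : (0:Int) ≤ (t.length:Int) + 1 := by positivity
      simp [PySem.List.pyGetD, PySem.List.pyGet?, PySem.List.pyIdx?, hnn]
    have hlen : ¬ (a :: b :: t).length < 2 := by simp
    rw [canSlice_alt, if_neg hlen]
    simp only [hg0, hg1]
    rw [PySem.List.pyRange_one]
    have hrange : (((a :: b :: t).length : Int) - 0).toNat = t.length + 1 + 1 := by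
      simp; omega
    rw [hrange]
    rw [List.map_map]
    have hmap' : ((List.range (t.length + 1 + 1)).map
        ((fun i => a + i * (b - a)) ∘ (fun k : Nat => (0:Int) + k))) =
        (List.range ((b :: t).length + 1)).map (fun k : Nat => a + (k : Int) * (b - a)) := by
      apply List.map_congr_left; intro k _; simp
    rw [hmap']
    rw [decide_eq_decide.mpr (affine_char (b :: t) a a (b - a))]
    simp only [pvDiffs_cons2]
    simp only [pvAllEq, List.all_cons, Bool.and_eq_true, true_and,
      beq_self_eq_true]
    cases h : (pvDiffs (b :: t)).all (fun x => x == (b - a)) <;> simp_all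
    infer_instance

-- A-side loop characterisation, on the suffix starting at position k ≥ 1
lemma go_suffix (indices : List Int) (d : Int) :
    ∀ (xs : List Int) (k : Nat), 1 ≤ k → indices.drop k = xs → xs ≠ [] →
      canSliceGo indices (PySem.List.pyRange (k : Int) ((indices.length : Int) - 1) 1) d
        = pvAllEq (pvDiffs xs) d := by
  intro xs
  induction xs with
  | nil => intro k _ _ h; exact absurd rfl h
  | cons x t ih =>
    intro k hk hdrop _
    have hkn : k < indices.length := by
      by_contra h
      have : indices.drop k = [] := List.drop_eq_nil_of_le (by omega)
      rw [hdrop] at this; exact absurd this (by simp)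
    have hx : PySem.List.pyGetD indices (k : Int) 0 = x := by
      rw [PySem.List.pyGetD_natCast]
      have h := List.getElem?_drop (xs := indices) (i := k) (j := 0)
      rw [hdrop] at h
      simp only [Nat.add_zero, List.getElem?_cons_zero] at h
      simp only [List.getD_eq_getElem?_getD]
      rw [← h]; rfl
    cases t with
    | nil =>
      have hlen : k + 1 = indices.length := by
        have := congrArg List.length hdrop
        simp at this; omega
      have : PySem.List.pyRange (k : Int) ((indices.length : Int) - 1) 1 = [] := by
        have : ((indices.length : Int) - 1) ≤ (k : Int) := by omega
        simp [PySem.List.pyRange]; omega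
      simp [this, canSliceGo, pvDiffs, pvAllEq]
    | cons y t' =>
      have hklt : (k : Int) < (indices.length : Int) - 1 := by
        have := congrArg List.length hdrop
        simp at this; omega
      rw [PySem.List.pyRange_one_cons hklt]
      have hy : PySem.List.pyGetD indices ((k : Int) + 1) 0 = y := by
        have : ((k : Int) + 1) = ((k + 1 : Nat) : Int) := by push_cast; ring
        rw [this, PySem.List.pyGetD_natCast]
        have hdrop' : indices.drop (k + 1) = y :: t' := by
          have := congrArg (fun l => l.drop 1) hdrop
          simpa [List.drop_drop] using this
        have h := List.getElem?_drop (xs := indices) (i := k + 1) (j := 0)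
        rw [hdrop'] at h
        simp only [Nat.add_zero, List.getElem?_cons_zero] at h
        simp only [List.getD_eq_getElem?_getD]
        rw [← h]; rfl
      have hk0 : ((k : Int) == 0) = false := by
        simp; omega
      rw [pvDiffs_cons2]
      by_cases hd : y - x = d
      · have hne : ((PySem.List.pyGetD indices ((k:Int) + 1) 0 -
            PySem.List.pyGetD indices (k:Int) 0) != d) = false := by
          simp [hx, hy, hd]
        simp only [canSliceGo, hk0, hne, Bool.false_eq_true]
        rw [show ((k : Int) + 1) = ((k + 1 : Nat) : Int) by push_cast; rfl]
        rw [ih (k + 1) (by omega)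
          (by have := congrArg (fun l => l.drop 1) hdrop
              simpa [List.drop_drop] using this) (by simp)]
        simp [pvAllEq, hd]
      · have hne : ((PySem.List.pyGetD indices ((k:Int) + 1) 0 -
            PySem.List.pyGetD indices (k:Int) 0) != d) = true := by
          simp [hx, hy, hd]
        simp only [canSliceGo, hk0, hne, if_true]
        simp [pvAllEq, hd]

lemma a_eq (indices : List Int) :
    canSlice indices =
      (match pvDiffs indices with
       | [] => true
       | d :: t => pvAllEq t d) := by
  unfold canSlice
  match indices with
  | [] => decide
  | [a] => simp [PySem.List.pyRange, canSliceGo, pvDiffs]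
  | a :: b :: t =>
    have hlt : (0 : Int) < ((a :: b :: t).length : Int) - 1 := by
      simp
    rw [show ((0:Int) = ((0:Nat):Int)) from rfl] at hlt ⊢
    rw [PySem.List.pyRange_one_cons hlt]
    have h0 : ((((0:Nat):Int)) == 0) = true := by decide
    simp only [canSliceGo, h0, if_true]
    have h1 : (((0:Nat):Int) + 1) = ((1:Nat):Int) := by norm_num
    rw [h1]
    rw [go_suffix (a :: b :: t)
        (PySem.List.pyGetD (a :: b :: t) 1 0 - PySem.List.pyGetD (a :: b :: t) 0 0)
        (b :: t) 1 (by omega) rfl (by simp)]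
    have hg1 : PySem.List.pyGetD (a :: b :: t) 1 0 = b := by
      simp [PySem.List.pyGetD, PySem.List.pyGet?, PySem.List.pyIdx?]
    have hg0 : PySem.List.pyGetD (a :: b :: t) 0 0 = a := by
      have hnn : (0:Int) ≤ (t.length:Int) + 1 := by positivity
      simp [PySem.List.pyGetD, PySem.List.pyGet?, PySem.List.pyIdx?, hnn]
    rw [hg1, hg0, pvDiffs_cons2]

-- ===== VERDICT (by name: the statement is the Claim_ definition above) =====
theorem canSlice_spec : Claim_equal_canSlice := by
  intro indices _
  unfold Spec_canSlice
  rw [a_eq, alt_eq]
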